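-- pv_equiv track=rewrite | github.com/IanMack-uk/nps-proof-pipeline | src/nps/models/toy/locality.py | ring_neighborhood
-- ===== SOURCE A (Python) =====
-- from typing import Dict, Set
--
-- def ring_neighborhood(m: int, radius: int = 1) -> Dict[int, Set[int]]:
--     if m <= 0:
--         raise ValueError("m must be positive")
--     if radius < 0:
--         raise ValueError("radius must be nonnegative")
--
--     neigh: Dict[int, Set[int]] = {}
--     for e in range(m):
--         s: Set[int] = set()
--         for k in range(-radius, radius + 1):
--             s.add((e + k) % m)
--         neigh[e] = s
--
--     check_neighborhood(neigh, m)
--     return neigh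
--
-- def check_neighborhood(neigh: Dict[int, Set[int]], m: int) -> None:
--     if set(neigh.keys()) != set(range(m)):
--         raise ValueError("Neighborhood keys must be exactly 0..m-1")
--     for e, s in neigh.items():
--         if e not in s:
--             raise ValueError(f"N({e}) must include {e}")
--         for j in s:
--             if j < 0 or j >= m:
--                 raise ValueError(f"N({e}) contains out-of-bounds index {j}")
-- ===== SOURCE B (Python) =====
-- def ring_neighborhood(m: int, radius: int = 1):
--     if m <= 0:
--         raise ValueError("m must be positive")
--     if radius < 0:
--         raise ValueError("radius must be nonnegative")
--
--     # circulant symmetry: compute N(0) once, then each N(e) is the previous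
--     # neighborhood rotated by +1 (mod m); no per-element window recomputation.
--     cur = list(dict.fromkeys(k % m for k in range(-radius, radius + 1)))
--     neigh = {}
--     for e in range(m):
--         neigh[e] = set(cur)
--         cur = [(x + 1) % m for x in cur]
--
--     check_neighborhood(neigh, m)
--     return neigh
--
--
-- def check_neighborhood(neigh, m):
--     if set(neigh.keys()) != set(range(m)):
--         raise ValueError("Neighborhood keys must be exactly 0..m-1")
--     for e, s in neigh.items():
--         if e not in s:
--             raise ValueError(f"N({e}) must include {e}")
--         for j in s:
--             if j < 0 or j >= m:
--                 raise ValueError(f"N({e}) contains out-of-bounds index {j}")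
-- ===== Notes on version B (the rewrite author's own statement) =====
-- stated objective: alternative
-- what changed: Instead of building each element's neighborhood independently by iterating offsets -radius..radius mod m, B exploits the ring's circulant symmetry: it computes the (deduplicated) neighborhood of vertex 0 once, then derives every subsequent neighborhood incrementally by rotating the previous one by +1 mod m.
import Mathlib
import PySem

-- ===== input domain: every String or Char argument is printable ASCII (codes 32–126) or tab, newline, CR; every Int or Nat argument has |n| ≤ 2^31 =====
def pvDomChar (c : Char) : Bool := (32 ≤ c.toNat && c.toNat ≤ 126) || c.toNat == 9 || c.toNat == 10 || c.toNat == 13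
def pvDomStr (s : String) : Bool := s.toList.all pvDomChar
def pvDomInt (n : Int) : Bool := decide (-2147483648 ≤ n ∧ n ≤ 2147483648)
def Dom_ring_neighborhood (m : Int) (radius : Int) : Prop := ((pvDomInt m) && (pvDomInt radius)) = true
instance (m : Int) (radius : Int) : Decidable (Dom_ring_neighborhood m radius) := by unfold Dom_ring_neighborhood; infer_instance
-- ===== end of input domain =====

-- B exploits the circulant symmetry of the ring: it computes the neighborhood of
-- vertex 0 once and derives every other neighborhood by rotating the previous one
-- by +1 (mod m), instead of recomputing a modular window per element (objective: alternative).

-- shared helper: check_neighborhood (pure validation; its pass/fail condition is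
-- order-independent, so iterating the dict/sets in list order is exact; 'true' = no raise)
def check_neighborhood (neigh : List (Int × List Int)) (m : Int) : Bool :=
  PySem.Set.equal (PySem.Set.ofList (neigh.map Prod.fst))
      (PySem.Set.ofList (PySem.List.pyRange 0 m 1)) &&
  neigh.all (fun es => decide (es.1 ∈ es.2) &&
    es.2.all (fun j => decide (0 ≤ j) && decide (j < m)))

-- ===== PORT A =====
-- the two 'raise ValueError' branches return [] (excluded by Pre_ring_neighborhood);
-- the 'else []' models check_neighborhood raising (never reached under Pre_)
def ring_neighborhood (m : Int) (radius : Int) : List (Int × List Int) :=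
  if m ≤ 0 then [] else
  if radius < 0 then [] else
  let neigh := (PySem.List.pyRange 0 m 1).foldl (fun d e =>
      d.insert e ((PySem.List.pyRange (-radius) (radius + 1) 1).foldl
        (fun s k => PySem.Set.add s (PySem.Int.mod (e + k) m)) PySem.Set.empty))
    PySem.Dict.empty
  if check_neighborhood neigh.items m then neigh.items else []

-- ===== PORT B =====
-- 'dict.fromkeys(…)' keeps first occurrences in order = PySem.Set.ofList;
-- the loop carries the pair (dict so far, current rotated list 'cur')
def ring_neighborhood_alt (m : Int) (radius : Int) : List (Int × List Int) :=
  if m ≤ 0 then [] else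
  if radius < 0 then [] else
  let cur0 := PySem.Set.ofList ((PySem.List.pyRange (-radius) (radius + 1) 1).map
      (fun k => PySem.Int.mod k m))
  let p := (PySem.List.pyRange 0 m 1).foldl
      (fun (p : PySem.Dict Int (List Int) × List Int) e =>
        (p.1.insert e (PySem.Set.ofList p.2), p.2.map (fun x => PySem.Int.mod (x + 1) m)))
      (PySem.Dict.empty, cur0)
  if check_neighborhood p.1.items m then p.1.items else []

-- ===== PRECONDITION & SPEC =====
-- A raises ValueError when m <= 0 or radius < 0; exactly those inputs are excluded.
def Pre_ring_neighborhood (m : Int) (radius : Int) : Prop := 0 < m ∧ 0 ≤ radius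
instance (m : Int) (radius : Int) : Decidable (Pre_ring_neighborhood m radius) := by
  unfold Pre_ring_neighborhood; infer_instance
def pvWitness_ring_neighborhood : Int × Int := (5, 2)

def Spec_ring_neighborhood (m : Int) (radius : Int) (out : List (Int × List Int)) : Prop := out = ring_neighborhood_alt m radius
instance (m : Int) (radius : Int) (out : List (Int × List Int)) : Decidable (Spec_ring_neighborhood m radius out) := by unfold Spec_ring_neighborhood; infer_instance

-- ===== CLAIM (what is proved, stated in full; the proofs are below) =====
def Claim_equal_ring_neighborhood : Prop := ∀ (m : Int) (radius : Int), Dom_ring_neighborhood m radius → Pre_ring_neighborhood m radius → Spec_ring_neighborhood m radius (ring_neighborhood m radius)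

-- ===== LEMMAS AND PROOFS =====

-- the window of min(2*radius+1, m) consecutive residues starting at e - radius:
-- the common normal form both ports' neighborhoods are reduced to
def pvWin (m radius e : Int) : List Int :=
  (List.range (min (2 * radius + 1).toNat m.toNat)).map
    (fun (i : Nat) => (e - radius + (i : Int)) % m)

-- periodicity of i ↦ (a + i) % m in i, with period m.toNat
lemma ring_mod_period (m a : Int) (hm : 0 < m) (i : Nat) :
    (a + (i : Int)) % m = (a + ((i % m.toNat : Nat) : Int)) % m := by
  have hi : i = i % m.toNat + m.toNat * (i / m.toNat) := (Nat.mod_add_div i m.toNat).symm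
  have hM : ((m.toNat : Int)) = m := Int.toNat_of_nonneg hm.le
  conv_lhs => rw [hi]
  push_cast
  rw [hM, ← add_assoc, Int.add_mul_emod_self_left]

-- injectivity of i ↦ (a + i) % m on [0, m.toNat)
lemma ring_mod_inj (m a : Int) (hm : 0 < m) {i j : Nat}
    (hi : i < m.toNat) (hj : j < m.toNat)
    (h : (a + (i : Int)) % m = (a + (j : Int)) % m) : i = j := by
  have h1 : ((i : Int) - (j : Int)) % m = 0 := by
    have h0 : ((a + (i : Int)) - (a + (j : Int))) % m
        = ((a + (i : Int)) % m - (a + (j : Int)) % m) % m := Int.sub_emod _ _ _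
    rw [h, sub_self, Int.zero_emod] at h0
    rw [show ((i : Int) - (j : Int)) = (a + (i : Int)) - (a + (j : Int)) by ring]
    exact h0
  obtain ⟨k, hk⟩ := Int.dvd_of_emod_eq_zero h1
  have hk1 : k < 1 := by
    by_contra hc
    have h2 : m ≤ m * k := le_mul_of_one_le_right hm.le (by omega)
    omega
  have hk2 : -1 < k := by
    by_contra hc
    have h2 : m * k ≤ m * (-1) := mul_le_mul_of_nonneg_left (by omega) hm.le
    omega
  have hk0 : k = 0 := by omega
  rw [hk0, mul_zero] at hk
  omega

lemma set_update_of_mem {α : Type} [BEq α] [LawfulBEq α] (l : List α) (s : PySem.Set α)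
    (h : ∀ x ∈ l, x ∈ s) : PySem.Set.update s l = s := by
  induction l generalizing s with
  | nil => rfl
  | cons x xs ih =>
    rw [PySem.Set.update_cons, PySem.Set.add_of_mem (h x (List.mem_cons_self ..))]
    exact ih s (fun y hy => h y (List.mem_cons_of_mem _ hy))

-- first-occurrence dedup of the n-term residue list [(a+i) % m | i < n]
-- is its first min n m.toNat terms
lemma ring_ofList_window (m a : Int) (hm : 0 < m) (n : Nat) :
    PySem.Set.ofList ((List.range n).map (fun (i : Nat) => (a + (i : Int)) % m)) =
    (List.range (min n m.toNat)).map (fun (i : Nat) => (a + (i : Int)) % m) := by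
  have hM : 0 < m.toNat := by omega
  have hnd : ∀ K, K ≤ m.toNat → ((List.range K).map (fun (i : Nat) => (a + (i : Int)) % m)).Nodup := by
    intro K hK
    refine List.Nodup.map_on ?_ ?_
    · intro x hx y hy hf
      exact ring_mod_inj m a hm (by simp at hx; omega) (by simp at hy; omega) hf
    · exact List.nodup_range
  by_cases hn : n ≤ m.toNat
  · rw [min_eq_left hn, PySem.Set.ofList_eq_self_of_nodup _ (hnd n hn)]
  · rw [min_eq_right (by omega : m.toNat ≤ n)]
    have hsplit : n = m.toNat + (n - m.toNat) := by omega
    rw [hsplit, List.range_add, List.map_append, PySem.Set.ofList_append,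
        PySem.Set.ofList_eq_self_of_nodup _ (hnd m.toNat le_rfl)]
    apply set_update_of_mem
    intro x hx
    simp only [List.mem_map, List.mem_range] at hx ⊢
    obtain ⟨j, _, rfl⟩ := hx
    exact ⟨j % m.toNat, Nat.mod_lt _ hM, (ring_mod_period m a hm j).symm⟩

lemma pvWin_nodup (m radius e : Int) (hm : 0 < m) : (pvWin m radius e).Nodup := by
  refine List.Nodup.map_on ?_ List.nodup_range
  intro x hx y hy hf
  exact ring_mod_inj m (e - radius) hm (by simp at hx; omega) (by simp at hy; omega) hf

-- A's per-element dedup-insert fold over offsets equals the window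
lemma ring_A_elem (m radius e : Int) (hm : 0 < m) (hr : 0 ≤ radius) :
    (PySem.List.pyRange (-radius) (radius + 1) 1).foldl
      (fun s k => PySem.Set.add s (PySem.Int.mod (e + k) m)) PySem.Set.empty
    = pvWin m radius e := by
  have hL : (PySem.List.pyRange (-radius) (radius + 1) 1).foldl
      (fun s k => PySem.Set.add s (PySem.Int.mod (e + k) m)) PySem.Set.empty
      = PySem.Set.ofList ((List.range (radius + 1 - -radius).toNat).map
          (fun (i : Nat) => (e - radius + (i : Int)) % m)) := by
    rw [PySem.List.pyRange_one, PySem.Set.ofList_eq_foldl, List.foldl_map, List.foldl_map]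
    congr 1
    funext s i
    congr 1
    rw [PySem.Int.mod_eq_emod_of_pos hm]
    congr 1
    ring
  rw [hL, ring_ofList_window m (e - radius) hm _]
  unfold pvWin
  congr 2
  omega

-- B's base list (dict.fromkeys of k % m) is the window of 0
lemma ring_B_base (m radius : Int) (hm : 0 < m) (hr : 0 ≤ radius) :
    PySem.Set.ofList ((PySem.List.pyRange (-radius) (radius + 1) 1).map
        (fun k => PySem.Int.mod k m)) = pvWin m radius 0 := by
  rw [PySem.List.pyRange_one, List.map_map]
  have h1 : ((fun k => PySem.Int.mod k m) ∘ fun (k : Nat) => -radius + (k : Int))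
      = fun (i : Nat) => (0 - radius + (i : Int)) % m := by
    funext i
    show PySem.Int.mod (-radius + (i : Int)) m = (0 - radius + (i : Int)) % m
    rw [PySem.Int.mod_eq_emod_of_pos hm]
    congr 1
    ring
  rw [h1, ring_ofList_window m (0 - radius) hm _]
  unfold pvWin
  congr 2
  omega

-- rotating a window by +1 gives the next window
lemma ring_rotate (m radius e : Int) (hm : 0 < m) :
    (pvWin m radius e).map (fun x => PySem.Int.mod (x + 1) m) = pvWin m radius (e + 1) := by
  unfold pvWin
  rw [List.map_map]
  apply List.map_congr_left
  intro i _
  show PySem.Int.mod ((e - radius + (i : Int)) % m + 1) m = (e + 1 - radius + (i : Int)) % m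
  rw [PySem.Int.mod_eq_emod_of_pos hm, Int.emod_add_emod]
  congr 1
  ring

-- B's pair-state fold: the dict accumulates windows, cur stays the next window
lemma ring_B_fold (m radius : Int) (hm : 0 < m) (n : Nat) (a : Int)
    (d : PySem.Dict Int (List Int)) :
    ((List.range n).map (fun (i : Nat) => a + (i : Int))).foldl
      (fun (p : PySem.Dict Int (List Int) × List Int) e =>
        (p.1.insert e (PySem.Set.ofList p.2), p.2.map (fun x => PySem.Int.mod (x + 1) m)))
      (d, pvWin m radius a)
    = (((List.range n).map (fun (i : Nat) => a + (i : Int))).foldl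
        (fun d e => d.insert e (pvWin m radius e)) d,
       pvWin m radius (a + n)) := by
  induction n with
  | zero => simp
  | succ n ih =>
    rw [List.range_succ, List.map_append, List.foldl_append, List.foldl_append, ih]
    simp only [List.map_cons, List.map_nil, List.foldl_cons, List.foldl_nil]
    rw [PySem.Set.ofList_eq_self_of_nodup _ (pvWin_nodup m radius (a + n) hm),
        ring_rotate m radius (a + n) hm]
    congr 2
    push_cast
    ring

-- ===== VERDICT (by name: the statement is the Claim_ definition above) =====
theorem ring_neighborhood_spec : Claim_equal_ring_neighborhood := by
  intro m radius _ hpre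
  obtain ⟨hm, hr⟩ := hpre
  unfold Spec_ring_neighborhood ring_neighborhood ring_neighborhood_alt
  simp only [if_neg (show ¬ m ≤ 0 by omega), if_neg (show ¬ radius < 0 by omega)]
  have hL : PySem.List.pyRange 0 m 1 = (List.range m.toNat).map (fun (k : Nat) => 0 + (k : Int)) := by
    rw [PySem.List.pyRange_one, show m - 0 = m by ring]
  have hB : ((PySem.List.pyRange 0 m 1).foldl
      (fun (p : PySem.Dict Int (List Int) × List Int) e =>
        (p.1.insert e (PySem.Set.ofList p.2), p.2.map (fun x => PySem.Int.mod (x + 1) m)))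
      (PySem.Dict.empty, PySem.Set.ofList ((PySem.List.pyRange (-radius) (radius + 1) 1).map
        (fun k => PySem.Int.mod k m)))).1
      = (PySem.List.pyRange 0 m 1).foldl (fun d e => d.insert e (pvWin m radius e))
          PySem.Dict.empty := by
    rw [ring_B_base m radius hm hr, hL, ring_B_fold m radius hm m.toNat 0 PySem.Dict.empty]
  have hA : (PySem.List.pyRange 0 m 1).foldl (fun d e =>
      d.insert e ((PySem.List.pyRange (-radius) (radius + 1) 1).foldl
        (fun s k => PySem.Set.add s (PySem.Int.mod (e + k) m)) PySem.Set.empty))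
      PySem.Dict.empty
      = (PySem.List.pyRange 0 m 1).foldl (fun d e => d.insert e (pvWin m radius e))
          PySem.Dict.empty := by
    apply PySem.List.foldl_congr_mem
    intro d e he
    rw [ring_A_elem m radius e hm hr]
  simp only [hA, hB]
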